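-- pv_equiv track=rewrite | github.com/mirohudec/treehouse-project7-user_profile_with_django | treehouse_project/user_profile/forms.py | check_lower_uppercase
-- ===== SOURCE A (Python) =====
-- def check_lower_uppercase(password):
--     lower = False
--     upper = False
--     for c in password:
--         if c.islower():
--             lower = True
--         if c.isupper():
--             upper = True
--         if upper and lower:
--             break
--     if lower is False or upper is False:
--         return True
--     return False
-- ===== SOURCE B (Python) =====
-- def check_lower_uppercase(password):
--     # Password lacks a case iff it is invariant under the corresponding case-folding.
--     return password == password.lower() or password == password.upper()
-- ===== Notes on version B (the rewrite author's own statement) =====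
-- stated objective: faster
-- what changed: Replaces the per-character flag-updating loop with whole-string case-folding and equality comparison: the password lacks uppercase iff it equals its lower(), lacks lowercase iff it equals its upper().
import Mathlib
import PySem

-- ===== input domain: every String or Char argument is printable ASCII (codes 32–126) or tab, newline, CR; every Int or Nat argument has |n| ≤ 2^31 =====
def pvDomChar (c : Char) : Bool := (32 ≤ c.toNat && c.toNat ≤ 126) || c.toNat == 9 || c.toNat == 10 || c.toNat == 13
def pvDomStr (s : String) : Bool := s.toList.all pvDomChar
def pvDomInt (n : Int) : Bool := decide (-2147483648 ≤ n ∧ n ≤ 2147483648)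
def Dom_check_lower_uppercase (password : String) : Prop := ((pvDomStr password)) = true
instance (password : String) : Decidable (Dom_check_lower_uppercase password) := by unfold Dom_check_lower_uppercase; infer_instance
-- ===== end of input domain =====

-- B replaces the per-character flag loop by case-folding the whole string and comparing twice; objective: faster (constant factor, measured).

-- ===== PORT A =====
-- the for-loop with mutable flags `lower`, `upper` and `break` when both become true
def check_lower_uppercase_loop (lower upper : Bool) : List Char → Bool × Bool
  | [] => (lower, upper)
  | c :: cs =>
    let lower := if PySem.Chars.islower c then true else lower
    let upper := if PySem.Chars.isupper c then true else upper
    if upper && lower then (lower, upper)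
    else check_lower_uppercase_loop lower upper cs

def check_lower_uppercase (password : String) : Bool :=
  let r := check_lower_uppercase_loop false false password.toList
  if r.1 = false ∨ r.2 = false then true else false

-- ===== PORT B =====
def check_lower_uppercase_alt (password : String) : Bool :=
  (password == PySem.Str.lower password) || (password == PySem.Str.upper password)

-- ===== PRECONDITION & SPEC =====
def Spec_check_lower_uppercase (password : String) (out : Bool) : Prop := out = check_lower_uppercase_alt password
instance (password : String) (out : Bool) : Decidable (Spec_check_lower_uppercase password out) := by unfold Spec_check_lower_uppercase; infer_instance

-- ===== CLAIM (what is proved, stated in full; the proofs are below) =====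
def Claim_equal_check_lower_uppercase : Prop := ∀ (password : String), Dom_check_lower_uppercase password → Spec_check_lower_uppercase password (check_lower_uppercase password)

-- ===== LEMMAS AND PROOFS =====

-- A's loop (even with the early break) computes exactly "some lower seen" / "some upper seen",
-- ORed with the incoming flags: the break only fires when both are already true.
theorem check_lower_uppercase_loop_eq (cs : List Char) : ∀ (l u : Bool),
    check_lower_uppercase_loop l u cs =
      (l || cs.any (fun c => PySem.Chars.islower c), u || cs.any (fun c => PySem.Chars.isupper c)) := by
  induction cs with
  | nil => intro l u; simp [check_lower_uppercase_loop]
  | cons c cs ih =>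
    intro l u
    simp only [check_lower_uppercase_loop, List.any_cons]
    by_cases hl : PySem.Chars.islower c <;> by_cases hu : PySem.Chars.isupper c <;>
      simp [hl, hu, ih] <;> cases l <;> cases u <;> simp

-- l.map f = l iff f fixes every element of l
theorem list_map_eq_self_iff (f : Char → Char) (l : List Char) :
    l.map f = l ↔ ∀ x ∈ l, f x = x := by
  induction l with
  | nil => simp
  | cons a l ih => simp [ih]

-- a character is fixed by lowerChar iff it is not uppercase (shifting by 32 never fixes it)
theorem lowerChar_eq_self_iff (c : Char) :
    PySem.Chars.lowerChar c = c ↔ PySem.Chars.isupper c = false := by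
  unfold PySem.Chars.lowerChar
  by_cases h : PySem.Chars.isupper c = true
  · have hb : 65 ≤ c.toNat ∧ c.toNat ≤ 90 := by
      unfold PySem.Chars.isupper at h
      simp only [Bool.and_eq_true, decide_eq_true_eq] at h
      obtain ⟨h1, h2⟩ := h
      rw [Char.le_def] at h1 h2
      exact ⟨h1, h2⟩
    have hval : (c.toNat + 32).isValidChar := Or.inl (by omega)
    rw [if_pos h, h]
    constructor
    · intro he
      have h2 : (Char.ofNat (c.toNat + 32)).toNat = c.toNat := by rw [he]
      rw [Char.ofNat, dif_pos hval, Char.toNat_ofNatAux hval] at h2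
      omega
    · intro hc; exact absurd hc (by simp)
  · rw [if_neg h]
    simp [Bool.not_eq_true] at h
    simp [h]

-- a character is fixed by upperChar iff it is not lowercase
theorem upperChar_eq_self_iff (c : Char) :
    PySem.Chars.upperChar c = c ↔ PySem.Chars.islower c = false := by
  unfold PySem.Chars.upperChar
  by_cases h : PySem.Chars.islower c = true
  · have hb : 97 ≤ c.toNat ∧ c.toNat ≤ 122 := by
      unfold PySem.Chars.islower at h
      simp only [Bool.and_eq_true, decide_eq_true_eq] at h
      obtain ⟨h1, h2⟩ := h
      rw [Char.le_def] at h1 h2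
      exact ⟨h1, h2⟩
    have hval : (c.toNat - 32).isValidChar := Or.inl (by omega)
    rw [if_pos h, h]
    constructor
    · intro he
      have h2 : (Char.ofNat (c.toNat - 32)).toNat = c.toNat := by rw [he]
      rw [Char.ofNat, dif_pos hval, Char.toNat_ofNatAux hval] at h2
      omega
    · intro hc; exact absurd hc (by simp)
  · rw [if_neg h]
    simp [Bool.not_eq_true] at h
    simp [h]

-- s == s.lower() holds exactly when s has no uppercase character
theorem lower_eq_self_iff (s : String) :
    (s == PySem.Str.lower s) = !(s.toList.any (fun c => PySem.Chars.isupper c)) := by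
  rw [Bool.beq_eq_decide_eq]
  by_cases h : (s.toList.any (fun c => PySem.Chars.isupper c)) = true
  · simp only [h, Bool.not_true, decide_eq_false_iff_not]
    simp only [List.any_eq_true] at h
    obtain ⟨c, hc, hup⟩ := h
    intro heq
    have hm : PySem.Chars.lower s.toList = s.toList := by
      rw [← PySem.Str.toList_lower s, ← heq]
    have := (list_map_eq_self_iff _ _).mp hm c hc
    rw [lowerChar_eq_self_iff] at this
    rw [this] at hup; cases hup
  · simp only [Bool.not_eq_true] at h
    simp only [h, Bool.not_false, decide_eq_true_eq]
    apply String.ext_iff.mpr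
    rw [show (PySem.Str.lower s).toList = PySem.Chars.lower s.toList from PySem.Str.toList_lower s]
    simp only [List.any_eq_false] at h
    exact ((list_map_eq_self_iff _ _).mpr
      (fun c hc => (lowerChar_eq_self_iff c).mpr (by simpa using h c hc))).symm

-- s == s.upper() holds exactly when s has no lowercase character
theorem upper_eq_self_iff (s : String) :
    (s == PySem.Str.upper s) = !(s.toList.any (fun c => PySem.Chars.islower c)) := by
  rw [Bool.beq_eq_decide_eq]
  by_cases h : (s.toList.any (fun c => PySem.Chars.islower c)) = true
  · simp only [h, Bool.not_true, decide_eq_false_iff_not]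
    simp only [List.any_eq_true] at h
    obtain ⟨c, hc, hlo⟩ := h
    intro heq
    have hm : PySem.Chars.upper s.toList = s.toList := by
      rw [← PySem.Str.toList_upper s, ← heq]
    have := (list_map_eq_self_iff _ _).mp hm c hc
    rw [upperChar_eq_self_iff] at this
    rw [this] at hlo; cases hlo
  · simp only [Bool.not_eq_true] at h
    simp only [h, Bool.not_false, decide_eq_true_eq]
    apply String.ext_iff.mpr
    rw [show (PySem.Str.upper s).toList = PySem.Chars.upper s.toList from PySem.Str.toList_upper s]
    simp only [List.any_eq_false] at h
    exact ((list_map_eq_self_iff _ _).mpr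
      (fun c hc => (upperChar_eq_self_iff c).mpr (by simpa using h c hc))).symm

-- ===== VERDICT (by name: the statement is the Claim_ definition above) =====
theorem check_lower_uppercase_spec : Claim_equal_check_lower_uppercase := by
  intro password _
  unfold Spec_check_lower_uppercase check_lower_uppercase check_lower_uppercase_alt
  rw [check_lower_uppercase_loop_eq, lower_eq_self_iff, upper_eq_self_iff]
  cases h1 : password.toList.any (fun c => PySem.Chars.islower c) <;>
    cases h2 : password.toList.any (fun c => PySem.Chars.isupper c) <;> simp
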